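-- pv_equiv track=rewrite | github.com/gannimo/checkVDvax | checkvax.py | check_availibility
-- ===== SOURCE A (Python) =====
-- def check_availibility(avails, old_avails):
--     for name in avails:
--         if name in old_avails:
--             if old_avails[name] != avails[name]:
--                 return True
--         else:
--             return True
--     return False
-- ===== SOURCE B (Python) =====
-- def check_availibility(avails, old_avails):
--     # merge old with new; anything new or changed makes the merged dict differ
--     merged = {**old_avails, **avails}
--     return merged != old_avails
-- ===== Notes on version B (the rewrite author's own statement) =====
-- stated objective: idiomatic
-- what changed: Instead of looping over avails with per-key membership tests and early returns, B constructs the merged dict {**old_avails, **avails} and reports whether the merge changed anything (merged != old_avails).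
import Mathlib
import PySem

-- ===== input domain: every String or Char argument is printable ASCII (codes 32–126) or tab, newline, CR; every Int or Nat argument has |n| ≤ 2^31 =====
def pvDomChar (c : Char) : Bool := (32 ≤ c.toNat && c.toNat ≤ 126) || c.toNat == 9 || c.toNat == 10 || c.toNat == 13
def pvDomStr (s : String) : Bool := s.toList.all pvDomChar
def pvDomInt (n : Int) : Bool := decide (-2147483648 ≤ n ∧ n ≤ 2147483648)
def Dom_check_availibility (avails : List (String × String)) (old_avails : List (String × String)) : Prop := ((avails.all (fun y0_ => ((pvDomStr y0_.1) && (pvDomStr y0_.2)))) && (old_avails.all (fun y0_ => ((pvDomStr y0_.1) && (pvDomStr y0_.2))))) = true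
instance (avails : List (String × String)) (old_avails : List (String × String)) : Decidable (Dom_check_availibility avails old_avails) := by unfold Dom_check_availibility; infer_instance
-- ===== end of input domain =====

-- B replaces A's lookup loop with early returns by building the merged dict
-- {**old_avails, **avails} and asking whether the merge changed the dict; equal
-- return values, no speed claim.

-- ===== PORT A =====
-- the 'for name in avails:' loop; lookups 'old_avails[name]' / 'avails[name]' are
-- first-match dict lookups (PySem.Dict.get?) into the two full dicts.
def pvLoopA (avails old_avails : List (String × String)) : List (String × String) → Bool
  | [] => false
  | (name, _) :: rest =>
    if (PySem.Dict.mk old_avails).contains name then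
      if (PySem.Dict.mk old_avails).get? name ≠ (PySem.Dict.mk avails).get? name then true
      else pvLoopA avails old_avails rest
    else true

def check_availibility (avails : List (String × String)) (old_avails : List (String × String)) : Bool :=
  pvLoopA avails old_avails avails

-- ===== PORT B =====
-- 'merged = {**old_avails, **avails}' is a fold of overwriting inserts into a copy of
-- old_avails; 'merged != old_avails' is Python's order-insensitive dict comparison
-- (length check plus per-key lookup), negated — Lean's '=' on PySem.Dict is
-- order-sensitive, so the comparison is ported explicitly.
def check_availibility_alt (avails : List (String × String)) (old_avails : List (String × String)) : Bool :=
  let merged := avails.foldl (fun d p => d.insert p.1 p.2) (PySem.Dict.mk old_avails)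
  ! (merged.size == (PySem.Dict.mk old_avails).size
     && merged.items.all (fun p => (PySem.Dict.mk old_avails).get? p.1 == some p.2))

-- ===== PRECONDITION & SPEC =====
-- Both arguments are Python dicts; an association list with a duplicated key does not
-- represent one (first-match list semantics and dict semantics diverge there), so
-- Pre_ requires the keys of each list to be distinct.
def Pre_check_availibility (avails : List (String × String)) (old_avails : List (String × String)) : Prop :=
  (avails.map Prod.fst).Nodup ∧ (old_avails.map Prod.fst).Nodup
instance (avails : List (String × String)) (old_avails : List (String × String)) : Decidable (Pre_check_availibility avails old_avails) := by unfold Pre_check_availibility; infer_instance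

def pvWitness_check_availibility : (List (String × String)) × (List (String × String)) :=
  ([("a", "x"), ("b", "y")], [("a", "x")])

def Spec_check_availibility (avails : List (String × String)) (old_avails : List (String × String)) (out : Bool) : Prop := out = check_availibility_alt avails old_avails
instance (avails : List (String × String)) (old_avails : List (String × String)) (out : Bool) : Decidable (Spec_check_availibility avails old_avails out) := by unfold Spec_check_availibility; infer_instance

-- ===== CLAIM (what is proved, stated in full; the proofs are below) =====
def Claim_equal_check_availibility : Prop := ∀ (avails : List (String × String)) (old_avails : List (String × String)), Dom_check_availibility avails old_avails → Pre_check_availibility avails old_avails → Spec_check_availibility avails old_avails (check_availibility avails old_avails)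

-- ===== LEMMAS AND PROOFS =====

-- A's loop over any sublist s of avails computes the negated pairwise-membership test on s.
lemma pvLoopA_eq_not_all (avails old_avails : List (String × String))
    (ha : (avails.map Prod.fst).Nodup) (ho : (old_avails.map Prod.fst).Nodup) :
    ∀ s : List (String × String), (∀ p ∈ s, p ∈ avails) →
      pvLoopA avails old_avails s = ! s.all (fun p => old_avails.contains p) := by
  intro s
  induction s with
  | nil => intro _; rfl
  | cons hd tl ih =>
    intro hsub
    obtain ⟨name, v⟩ := hd
    have hmem : (name, v) ∈ avails := hsub _ (List.mem_cons_self)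
    have hga : (PySem.Dict.mk avails).get? name = some v :=
      PySem.Dict.get?_of_mem_items _ hmem ha
    by_cases hc : (PySem.Dict.mk old_avails).contains name = true
    · obtain ⟨w, hw⟩ : ∃ w, (PySem.Dict.mk old_avails).get? name = some w := by
        have h := PySem.Dict.contains_eq_isSome_get? (PySem.Dict.mk old_avails) name
        rw [hc] at h
        exact Option.isSome_iff_exists.mp h.symm
      by_cases hwv : w = v
      · subst hwv
        have hmo : (name, w) ∈ old_avails := PySem.Dict.mem_items_of_get?_eq_some _ hw
        have ihh := ih (fun p hp => hsub p (List.mem_cons_of_mem _ hp))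
        simp [pvLoopA, hc, hw, hga, hmo, ihh]
      · have hnmo : (name, v) ∉ old_avails := fun hmo => by
          have h2 := PySem.Dict.get?_of_mem_items (PySem.Dict.mk old_avails) hmo ho
          rw [hw] at h2
          exact hwv (Option.some.inj h2)
        simp [pvLoopA, hc, hw, hga, hwv]
        exact Or.inl hnmo
    · have hnmo : (name, v) ∉ old_avails := fun hmo =>
        hc ((PySem.Dict.contains_iff_mem_keys _ _).mpr (PySem.Dict.mem_keys_of_mem_items _ hmo))
      simp [pvLoopA, hc]
      exact Or.inl hnmo

-- an overwriting insert of a pair the dict already holds is the identity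
lemma pvInsert_self_of_get? (d : PySem.Dict String String) (k v : String)
    (hnd : d.keys.Nodup) (h : d.get? k = some v) : d.insert k v = d := by
  apply PySem.Dict.ext
  have hc : d.contains k = true := by
    rw [PySem.Dict.contains_eq_isSome_get?, h]; rfl
  rw [PySem.Dict.items_insert_of_contains d v hc]
  refine (List.map_congr_left ?_).trans (List.map_id d.items)
  intro p hp
  obtain ⟨a, b⟩ := p
  by_cases hk : a = k
  · subst hk
    have hv : d.get? a = some b := PySem.Dict.get?_of_mem_items _ (by simpa using hp) hnd
    rw [h] at hv
    simp [Option.some.inj hv]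
  · simp [hk]

-- lookup after the merging fold: avails first (first match, keys distinct), else the base dict
lemma pvGet?_foldl_insert (l : List (String × String)) :
    (l.map Prod.fst).Nodup → ∀ (d : PySem.Dict String String) (k : String),
      (l.foldl (fun d p => d.insert p.1 p.2) d).get? k =
        ((PySem.Dict.mk l).get? k).elim (d.get? k) some := by
  induction l with
  | nil => intro _ d k; rfl
  | cons p t ih =>
    intro hnd d k
    have hnd' : (t.map Prod.fst).Nodup := (List.nodup_cons.mp hnd).2
    have hp1 : p.1 ∉ t.map Prod.fst := (List.nodup_cons.mp hnd).1
    rw [List.foldl_cons, ih hnd' (d.insert p.1 p.2) k]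
    rw [PySem.Dict.get?_mk_cons]
    by_cases hk : p.1 = k
    · subst hk
      have hnone : (PySem.Dict.mk t).get? p.1 = none := by
        rw [PySem.Dict.get?_eq_none_iff_not_mem_keys]
        simpa using hp1
      simp [hnone, PySem.Dict.get?_insert_self]
    · have hbk : (p.1 == k) = false := by simp [hk]
      rw [hbk]
      simp only [Bool.false_eq_true, if_false]
      cases hmt : (PySem.Dict.mk t).get? k with
      | some w => simp
      | none => simp [PySem.Dict.get?_insert_of_ne _ _ (Ne.symm hk)]

-- if every pair of avails is already in old_avails, the merging fold is the identity
lemma pvFoldl_insert_eq_self (old_avails : List (String × String))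
    (ho : (old_avails.map Prod.fst).Nodup) :
    ∀ l : List (String × String), (∀ p ∈ l, p ∈ old_avails) →
      l.foldl (fun d p => d.insert p.1 p.2) (PySem.Dict.mk old_avails) = PySem.Dict.mk old_avails := by
  intro l
  induction l with
  | nil => intro _; rfl
  | cons p t ih =>
    intro hsub
    have hmem : p ∈ old_avails := hsub _ (List.mem_cons_self)
    have hget : (PySem.Dict.mk old_avails).get? p.1 = some p.2 :=
      PySem.Dict.get?_of_mem_items _ (by simpa using hmem) (by simpa [PySem.Dict.keys] using ho)
    rw [List.foldl_cons,
        pvInsert_self_of_get? _ _ _ (by simpa [PySem.Dict.keys] using ho) hget]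
    exact ih (fun q hq => hsub q (List.mem_cons_of_mem _ hq))

-- ===== VERDICT (by name: the statement is the Claim_ definition above) =====
theorem check_availibility_spec : Claim_equal_check_availibility := by
  intro avails old_avails _ hpre
  obtain ⟨ha, ho⟩ := hpre
  unfold Spec_check_availibility check_availibility check_availibility_alt
  rw [pvLoopA_eq_not_all avails old_avails ha ho avails (fun _ hp => hp)]
  congr 1
  set old := PySem.Dict.mk old_avails with hold
  set merged := avails.foldl (fun d p => d.insert p.1 p.2) old with hmerged
  have hok : old.keys.Nodup := by simpa [PySem.Dict.keys, hold] using ho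
  -- the per-pair check of the whole merged dict succeeds iff every pair of avails is in old_avails
  by_cases hall : ∀ p ∈ avails, p ∈ old_avails
  · have hm : merged = old := pvFoldl_insert_eq_self old_avails ho avails hall
    have hchk : old.items.all (fun p => old.get? p.1 == some p.2) = true := by
      simp only [List.all_eq_true]
      intro p hp
      simp [PySem.Dict.get?_of_mem_items _ hp hok]
    have hlhs : avails.all (fun p => old_avails.contains p) = true := by
      simp only [List.all_eq_true]
      intro p hp
      simpa using hall p hp
    rw [hm, hchk, hlhs]
    simp
  · obtain ⟨q, hq, hqn⟩ : ∃ p ∈ avails, p ∉ old_avails := by simpa using hall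
    have hgq : (PySem.Dict.mk avails).get? q.1 = some q.2 :=
      PySem.Dict.get?_of_mem_items _ (by simpa using hq) ha
    have hmq : merged.get? q.1 = some q.2 := by
      rw [hmerged, pvGet?_foldl_insert avails ha old q.1, hgq]
      rfl
    have hqm : q ∈ merged.items := by
      have := PySem.Dict.mem_items_of_get?_eq_some _ hmq
      simpa using this
    have hchk : merged.items.all (fun p => old.get? p.1 == some p.2) = false := by
      apply List.all_eq_false.mpr
      refine ⟨q, hqm, ?_⟩
      simp only [beq_iff_eq]
      intro hgo
      exact hqn (by simpa using PySem.Dict.mem_items_of_get?_eq_some _ hgo)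
    have hlhs : avails.all (fun p => old_avails.contains p) = false := by
      apply List.all_eq_false.mpr
      exact ⟨q, hq, by simpa using hqn⟩
    rw [hlhs, hchk]
    simp
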